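-- pv_equiv track=rewrite | github.com/RaoMitesh21/CareerLens | careerlens-backend/app/services/roadmap_generator.py | _phase_spans
-- ===== SOURCE A (Python) =====
-- from typing import Dict, List
--
-- def _phase_spans(total_months: int, phase_count: int) -> List[str]:
--     """Split total months into contiguous phase duration labels."""
--     if phase_count <= 0:
--         return []
--
--     each = total_months // phase_count
--     remainder = total_months % phase_count
--
--     spans: List[str] = []
--     start = 1
--     for i in range(phase_count):
--         extra = 1 if i < remainder else 0
--         length = each + extra
--         end = start + length - 1
--         spans.append(f"Months {start}-{end}")
--         start = end + 1
--
--     return spans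
-- ===== SOURCE B (Python) =====
-- from typing import Dict, List
--
-- def _phase_spans(total_months: int, phase_count: int) -> List[str]:
--     """Split total months into contiguous phase duration labels (closed-form bounds per phase)."""
--     if phase_count <= 0:
--         return []
--     each, remainder = divmod(total_months, phase_count)
--     return [
--         f"Months {each * i + min(i, remainder) + 1}-{each * (i + 1) + min(i + 1, remainder)}"
--         for i in range(phase_count)
--     ]
-- ===== Notes on version B (the rewrite author's own statement) =====
-- stated objective: alternative
-- what changed: Replaces the stateful loop that carries a running `start` accumulator with a comprehension computing each phase's start/end in closed form from the index (start = each*i + min(i,remainder) + 1).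
import Mathlib
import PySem

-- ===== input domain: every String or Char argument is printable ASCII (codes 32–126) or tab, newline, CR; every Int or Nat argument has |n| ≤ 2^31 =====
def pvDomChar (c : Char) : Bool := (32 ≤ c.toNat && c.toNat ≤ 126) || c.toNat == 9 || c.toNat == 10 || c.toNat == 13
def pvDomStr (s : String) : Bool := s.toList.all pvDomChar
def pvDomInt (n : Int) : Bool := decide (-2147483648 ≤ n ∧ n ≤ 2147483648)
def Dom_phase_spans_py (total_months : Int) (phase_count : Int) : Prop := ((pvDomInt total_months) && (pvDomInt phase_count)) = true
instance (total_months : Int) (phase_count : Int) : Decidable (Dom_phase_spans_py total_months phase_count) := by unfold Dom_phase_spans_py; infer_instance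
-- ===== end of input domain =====

-- B replaces A's loop-carried running `start` with closed-form per-index phase bounds (alternative decomposition, same cost).


-- ===== PORT A =====
-- literal port of A: a fold carrying (spans, start) over range(phase_count)
def phase_spans_py (total_months : Int) (phase_count : Int) : List String :=
  if phase_count ≤ 0 then []
  else
    let each := PySem.Int.floordiv total_months phase_count
    let remainder := PySem.Int.mod total_months phase_count
    let res := (PySem.List.pyRange 0 phase_count 1).foldl
      (fun (st : List String × Int) i =>
        let extra : Int := if i < remainder then 1 else 0
        let length := each + extra
        let endv := st.2 + length - 1
        (st.1 ++ ["Months " ++ PySem.Int.toStr st.2 ++ "-" ++ PySem.Int.toStr endv],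
         endv + 1))
      (([] : List String), (1 : Int))
    res.1

-- ===== PORT B =====
-- literal port of B: closed-form bounds per index, no loop-carried state
def phase_spans_py_alt (total_months : Int) (phase_count : Int) : List String :=
  if phase_count ≤ 0 then []
  else
    let each := PySem.Int.floordiv total_months phase_count
    let remainder := PySem.Int.mod total_months phase_count
    (PySem.List.pyRange 0 phase_count 1).map (fun i =>
      "Months " ++ PySem.Int.toStr (each * i + min i remainder + 1) ++ "-" ++
        PySem.Int.toStr (each * (i + 1) + min (i + 1) remainder))

-- ===== PRECONDITION & SPEC =====
def Spec_phase_spans_py (total_months : Int) (phase_count : Int) (out : List String) : Prop := out = phase_spans_py_alt total_months phase_count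
instance (total_months : Int) (phase_count : Int) (out : List String) : Decidable (Spec_phase_spans_py total_months phase_count out) := by unfold Spec_phase_spans_py; infer_instance

-- ===== CLAIM (what is proved, stated in full; the proofs are below) =====
def Claim_equal_phase_spans_py : Prop := ∀ (total_months : Int) (phase_count : Int), Dom_phase_spans_py total_months phase_count → Spec_phase_spans_py total_months phase_count (phase_spans_py total_months phase_count)

-- ===== LEMMAS AND PROOFS =====

-- closed form of A's fold over range(0, n): the spans are B's closed-form labels and the
-- running start equals 1 + each*n + min n remainder (for remainder ≥ 0)
theorem phase_spans_loop_closed (each remainder : Int) (hr : 0 ≤ remainder) (n : Nat) :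
    (PySem.List.pyRange 0 (n : Int) 1).foldl
      (fun (st : List String × Int) i =>
        let extra : Int := if i < remainder then 1 else 0
        let length := each + extra
        let endv := st.2 + length - 1
        (st.1 ++ ["Months " ++ PySem.Int.toStr st.2 ++ "-" ++ PySem.Int.toStr endv],
         endv + 1))
      (([] : List String), (1 : Int))
    = ((PySem.List.pyRange 0 (n : Int) 1).map (fun i =>
        "Months " ++ PySem.Int.toStr (each * i + min i remainder + 1) ++ "-" ++
          PySem.Int.toStr (each * (i + 1) + min (i + 1) remainder)),
       1 + each * n + min (n : Int) remainder) := by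
  induction n with
  | zero =>
    rw [PySem.List.pyRange_one_eq_nil (by omega)]
    simp [hr]
  | succ m ih =>
    have hsplit : PySem.List.pyRange 0 ((m + 1 : Nat) : Int) 1
        = PySem.List.pyRange 0 (m : Int) 1 ++ [(m : Int)] := by
      push_cast
      exact PySem.List.pyRange_one_succ_right (by omega)
    rw [hsplit, List.foldl_append, ih, List.map_append]
    simp only [List.foldl_cons, List.foldl_nil, List.map_cons, List.map_nil, Prod.mk.injEq]
    refine ⟨?_, ?_⟩
    · congr 2
      have h1 : each * (m : Int) + min (m : Int) remainder + 1
          = 1 + each * (m : Int) + min (m : Int) remainder := by ring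
      have h2 : each * ((m : Int) + 1) + min ((m : Int) + 1) remainder
          = 1 + each * (m : Int) + min (m : Int) remainder +
              (each + (if (m : Int) < remainder then 1 else 0)) - 1 := by
        rcases le_or_gt remainder (m : Int) with h | h
        · rw [min_eq_right h, min_eq_right (by omega), if_neg (by omega)]; ring
        · rw [min_eq_left (by omega), min_eq_left (by omega), if_pos h]; ring
      rw [h1, h2]
    · push_cast
      rcases le_or_gt remainder (m : Int) with h | h
      · rw [min_eq_right h, min_eq_right (by omega), if_neg (by omega)]; ring
      · rw [min_eq_left h.le, min_eq_left (by omega), if_pos h]; ring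

-- ===== VERDICT (by name: the statement is the Claim_ definition above) =====
theorem phase_spans_py_spec : Claim_equal_phase_spans_py := by
  intro total_months phase_count _
  unfold Spec_phase_spans_py
  by_cases hpc : phase_count ≤ 0
  · simp [phase_spans_py, phase_spans_py_alt, hpc]
  · have hpos : 0 < phase_count := by omega
    have hr : 0 ≤ PySem.Int.mod total_months phase_count := by
      rw [PySem.Int.mod_eq_emod_of_pos hpos]
      exact Int.emod_nonneg _ (by omega)
    obtain ⟨n, rfl⟩ : ∃ n : Nat, phase_count = (n : Int) :=
      ⟨phase_count.toNat, (Int.toNat_of_nonneg hpos.le).symm⟩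
    simp only [phase_spans_py, phase_spans_py_alt, if_neg hpc]
    rw [phase_spans_loop_closed _ _ hr n]
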